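-- pv_equiv track=rewrite | github.com/kendalharland/Serpent | serpent.py | _gen_serpent_body
-- ===== SOURCE A (Python) =====
-- def _gen_serpent_body(sss):
-- 	"Generate the serpent body of the bytecode file"
-- 	stage = {
-- 		"0": " "*8+ "%s | |z\n",
-- 		"1": " "*7+"%s| | |\n",
-- 		"2": " "*9+  "%s| |\n",
-- 		"3": " "*10+   "|%s|\n",
-- 		"4": " "*10+  "| |%s\n",
-- 		"5": " "*10+  "| | %s\n",
-- 		"6": " "*10+  "| | |%s\n",
-- 		"7": " "*9+ "z| | |%s\n",
-- 	}
--
-- 	index = 1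
-- 	body = ""
--
-- 	while len(sss) > 0:
-- 		body += stage[str(index)] % sss.pop(0)
-- 		index = (index + 1) % 8
-- 	while index % 8 != 0:
-- 		body += stage[str(index)] % 'zz '
-- 		index = (index + 1) % 8
-- 	return body
-- ===== SOURCE B (Python) =====
-- def _gen_serpent_body(sss):
-- 	"Generate the serpent body of the bytecode file"
-- 	stage = {
-- 		"0": " "*8+ "%s | |z\n",
-- 		"1": " "*7+"%s| | |\n",
-- 		"2": " "*9+  "%s| |\n",
-- 		"3": " "*10+   "|%s|\n",
-- 		"4": " "*10+  "| |%s\n",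
-- 		"5": " "*10+  "| | %s\n",
-- 		"6": " "*10+  "| | |%s\n",
-- 		"7": " "*9+ "z| | |%s\n",
-- 	}
-- 	n = len(sss)
-- 	pad = (8 - (1 + n) % 8) % 8
-- 	vals = list(sss) + ['zz '] * pad
-- 	sss.clear()  # preserve A's destructive pop(0) emptying of the argument
-- 	return ''.join(stage[str((i + 1) % 8)] % v for i, v in enumerate(vals))
-- ===== Notes on version B (the rewrite author's own statement) =====
-- stated objective: faster
-- what changed: Replaced A's two stateful while loops (pop(0) with a cycling index and string +=, then a second pad-until-aligned loop) by a closed-form padding count (8-(1+n)%8)%8 and a single uniform enumerate+join pass over the padded value list; the destructive emptying of sss is kept via clear().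
import Mathlib
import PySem

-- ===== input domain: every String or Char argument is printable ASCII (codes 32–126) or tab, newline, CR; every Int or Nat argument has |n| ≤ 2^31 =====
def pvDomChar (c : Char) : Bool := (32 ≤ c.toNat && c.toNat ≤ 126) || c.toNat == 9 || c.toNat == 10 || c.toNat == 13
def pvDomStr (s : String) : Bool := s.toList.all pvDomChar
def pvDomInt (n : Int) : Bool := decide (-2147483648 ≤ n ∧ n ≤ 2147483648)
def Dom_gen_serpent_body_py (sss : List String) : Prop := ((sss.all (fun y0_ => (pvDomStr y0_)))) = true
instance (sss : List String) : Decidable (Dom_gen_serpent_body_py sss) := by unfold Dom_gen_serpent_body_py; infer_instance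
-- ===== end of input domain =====

-- B replaces A's two index-driven while loops by a closed-form padding count and one
-- uniform enumerate-join pass (objective: simpler). A empties its argument via pop(0);
-- B preserves that side effect with clear(); the equivalence proved here is about the
-- return value only.

-- the `stage` template table (shared data: stage[str(i)] % v)
def pvStage (i : Int) (v : String) : String :=
  if i = 0 then "        " ++ v ++ " | |z\n"
  else if i = 1 then "       " ++ v ++ "| | |\n"
  else if i = 2 then "         " ++ v ++ "| |\n"
  else if i = 3 then "          |" ++ v ++ "|\n"
  else if i = 4 then "          | |" ++ v ++ "\n"
  else if i = 5 then "          | | " ++ v ++ "\n"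
  else if i = 6 then "          | | |" ++ v ++ "\n"
  else if i = 7 then "         z| | |" ++ v ++ "\n"
  else ""  -- unreachable: index is always taken mod 8

-- ===== PORT A =====
-- first while loop: consume sss front to back, cycling index
def genLoopA : List String → Int → String → (Int × String)
  | [], index, body => (index, body)
  | v :: t, index, body => genLoopA t (PySem.Int.mod (index + 1) 8) (body ++ pvStage index v)

-- second while loop: pad until index % 8 == 0; it runs at most 7 steps, fuel 8 only
-- makes the recursion total and is never exhausted
def genPadA : Nat → Int → String → String
  | 0, _, body => body
  | fuel + 1, index, body =>
      if PySem.Int.mod index 8 ≠ 0 then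
        genPadA fuel (PySem.Int.mod (index + 1) 8) (body ++ pvStage index "zz ")
      else body

def gen_serpent_body_py (sss : List String) : String :=
  let p := genLoopA sss 1 ""
  genPadA 8 p.1 p.2

-- ===== PORT B =====
def gen_serpent_body_py_alt (sss : List String) : String :=
  let n : Int := sss.length
  let pad := PySem.Int.mod (8 - PySem.Int.mod (1 + n) 8) 8
  let vals := sss ++ List.replicate pad.toNat "zz "
  String.join ((PySem.List.enumerate vals).map (fun iv => pvStage (PySem.Int.mod (iv.1 + 1) 8) iv.2))

-- ===== PRECONDITION & SPEC =====
def Spec_gen_serpent_body_py (sss : List String) (out : String) : Prop := out = gen_serpent_body_py_alt sss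
instance (sss : List String) (out : String) : Decidable (Spec_gen_serpent_body_py sss out) := by unfold Spec_gen_serpent_body_py; infer_instance

-- ===== CLAIM (what is proved, stated in full; the proofs are below) =====
def Claim_equal_gen_serpent_body_py : Prop := ∀ (sss : List String), Dom_gen_serpent_body_py sss → Spec_gen_serpent_body_py sss (gen_serpent_body_py sss)

-- ===== LEMMAS AND PROOFS =====

theorem pvMod8 (a : Int) : PySem.Int.mod a 8 = a % 8 :=
  PySem.Int.mod_eq_emod_of_pos (by norm_num)

theorem pvFoldl_join (l : List String) : ∀ a : String,
    l.foldl (· ++ ·) a = a ++ l.foldl (· ++ ·) "" := by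
  induction l with
  | nil => intro a; simp
  | cons s t ih =>
      intro a
      rw [List.foldl_cons, List.foldl_cons, ih (a ++ s), ih ("" ++ s)]
      simp [String.append_assoc]

theorem pvJoin_cons (s : String) (l : List String) : String.join (s :: l) = s ++ String.join l := by
  simp only [String.join, List.foldl_cons]
  rw [pvFoldl_join]
  simp

-- canonical rendering: one stage line per value, index cycling mod 8
def pvRender : List String → Int → String
  | [], _ => ""
  | v :: t, i => pvStage (i % 8) v ++ pvRender t (i + 1)

theorem pvRender_congr (t : List String) : ∀ i j : Int, i % 8 = j % 8 →
    pvRender t i = pvRender t j := by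
  induction t with
  | nil => intro i j _; rfl
  | cons v t ih =>
      intro i j h
      simp only [pvRender, h]
      rw [ih (i + 1) (j + 1) (by omega)]

theorem pvRender_append (a b : List String) : ∀ i : Int,
    pvRender (a ++ b) i = pvRender a i ++ pvRender b (i + a.length) := by
  induction a with
  | nil => intro i; simp [pvRender]
  | cons v t ih =>
      intro i
      simp only [List.cons_append, pvRender, ih (i + 1), String.append_assoc,
        List.length_cons]
      push_cast
      rw [show i + 1 + (t.length : Int) = i + ((t.length : Int) + 1) by omega]

theorem genLoopA_eq (t : List String) : ∀ (i : Int) (body : String), i % 8 = i →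
    genLoopA t i body = ((i + t.length) % 8, body ++ pvRender t i) := by
  induction t with
  | nil => intro i body h; simp [genLoopA, pvRender, h]
  | cons v t ih =>
      intro i body h
      simp only [genLoopA, pvMod8]
      rw [ih ((i + 1) % 8) (body ++ pvStage i v) (by omega)]
      refine Prod.ext ?_ ?_
      · show ((i + 1) % 8 + (t.length : Int)) % 8 = (i + (t.length + 1 : Nat)) % 8
        push_cast
        omega
      · show body ++ pvStage i v ++ pvRender t ((i + 1) % 8)
          = body ++ pvRender (v :: t) i
        rw [pvRender_congr t ((i + 1) % 8) (i + 1) (by omega)]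
        simp [pvRender, h, String.append_assoc]

theorem genPadA_eq (i : Int) (body : String) (h0 : 0 ≤ i) (h8 : i < 8) :
    genPadA 8 i body = body ++ pvRender (List.replicate ((8 - i) % 8).toNat "zz ") i := by
  interval_cases i <;>
    simp [genPadA, pvRender, pvStage, String.append_assoc]

theorem pvJoin_enumerate (vals : List String) : ∀ j : Int,
    String.join ((PySem.List.enumerate vals j).map
      (fun iv => pvStage (PySem.Int.mod (iv.1 + 1) 8) iv.2)) = pvRender vals (j + 1) := by
  induction vals with
  | nil => intro j; simp [PySem.List.enumerate_nil, pvRender, String.join]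
  | cons v t ih =>
      intro j
      rw [PySem.List.enumerate_cons]
      rw [List.map_cons, pvJoin_cons, ih (j + 1)]
      show _ = pvStage ((j + 1) % 8) v ++ pvRender t (j + 1 + 1)
      rw [pvMod8]

-- ===== VERDICT (by name: the statement is the Claim_ definition above) =====
theorem gen_serpent_body_py_spec : Claim_equal_gen_serpent_body_py := by
  intro sss _
  unfold Spec_gen_serpent_body_py gen_serpent_body_py gen_serpent_body_py_alt
  rw [genLoopA_eq sss 1 "" (by decide)]
  rw [genPadA_eq ((1 + (sss.length : Int)) % 8) _ (by omega) (by omega)]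
  rw [pvJoin_enumerate]
  simp only [pvMod8]
  rw [pvRender_append]
  rw [pvRender_congr (List.replicate ((8 - (1 + (sss.length : Int)) % 8) % 8).toNat "zz ")
        ((1 + (sss.length : Int)) % 8) (1 + (sss.length : Int)) (by omega)]
  all_goals simp
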